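-- pv_equiv track=rewrite | github.com/aalto-ai/gscan-metaseq2seq | scripts/generate_data.py | generate_limited_adverb_verb_combos
-- ===== SOURCE A (Python) =====
-- import itertools
--
-- def generate_limited_adverb_verb_combos(
--     possible_verbs,
--     possible_adverbs,
--     verb_words_in_instruction,
--     adverb_words_in_instruction,
-- ):
--     for possible_verb, possible_adverb in itertools.product(
--         possible_verbs, possible_adverbs
--     ):
--         verb_is_in_instruction = all(
--             [w in verb_words_in_instruction for w in possible_verb]
--         )
--         adverb_is_in_instruction = (
--             possible_adverb
--             and all([w in adverb_words_in_instruction for w in possible_adverb])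
--         ) or (not adverb_words_in_instruction and not possible_adverb)
--
--         # If the adverb is in the instruction, we can generate all possible verbs
--         if adverb_is_in_instruction:
--             yield (possible_verb, possible_adverb)
--             continue
--
--         # If the verb is in the instruction, we can generate all possible adverbs
--         if verb_is_in_instruction:
--             yield (possible_verb, possible_adverb)
--             continue
-- ===== SOURCE B (Python) =====
-- def generate_limited_adverb_verb_combos(
--     possible_verbs,
--     possible_adverbs,
--     verb_words_in_instruction,
--     adverb_words_in_instruction,
-- ):
--     # Precompute which adverbs qualify on their own (empty adverb qualifies
--     # exactly when adverb_words_in_instruction is empty).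
--     adverb_qualifies = [
--         (bool(a) and all(w in adverb_words_in_instruction for w in a))
--         or (not adverb_words_in_instruction and not a)
--         for a in possible_adverbs
--     ]
--     for verb in possible_verbs:
--         if all(w in verb_words_in_instruction for w in verb):
--             # Verb present: emit the whole row of adverbs.
--             for adverb in possible_adverbs:
--                 yield (verb, adverb)
--         else:
--             # Verb absent: emit only qualifying adverbs.
--             for adverb, q in zip(possible_adverbs, adverb_qualifies):
--                 if q:
--                     yield (verb, adverb)
-- ===== Notes on version B (the rewrite author's own statement) =====
-- stated objective: faster
-- what changed: B precomputes the per-adverb qualification list once and hoists the verb membership test out of the inner loop, emitting a whole row of pairs when the verb qualifies and only the precomputed qualifying adverbs otherwise, instead of A's recomputation of both membership tests for every (verb, adverb) pair of the product.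
import Mathlib
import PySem

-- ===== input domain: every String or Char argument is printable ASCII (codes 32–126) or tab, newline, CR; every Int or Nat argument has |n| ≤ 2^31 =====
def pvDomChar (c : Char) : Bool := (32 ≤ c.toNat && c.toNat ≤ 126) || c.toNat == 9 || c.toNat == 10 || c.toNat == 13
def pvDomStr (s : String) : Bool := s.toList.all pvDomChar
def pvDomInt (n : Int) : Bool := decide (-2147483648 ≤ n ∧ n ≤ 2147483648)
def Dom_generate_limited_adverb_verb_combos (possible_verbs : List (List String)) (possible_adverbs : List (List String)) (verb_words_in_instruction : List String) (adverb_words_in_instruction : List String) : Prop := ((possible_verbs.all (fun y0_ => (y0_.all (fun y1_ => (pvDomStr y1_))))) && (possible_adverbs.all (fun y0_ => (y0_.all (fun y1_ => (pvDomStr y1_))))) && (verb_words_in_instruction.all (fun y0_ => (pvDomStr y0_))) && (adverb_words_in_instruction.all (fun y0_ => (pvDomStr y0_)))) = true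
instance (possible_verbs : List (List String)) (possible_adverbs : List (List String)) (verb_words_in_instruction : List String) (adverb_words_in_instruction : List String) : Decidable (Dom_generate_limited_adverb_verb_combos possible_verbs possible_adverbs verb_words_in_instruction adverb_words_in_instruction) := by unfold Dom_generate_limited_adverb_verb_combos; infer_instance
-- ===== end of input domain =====

-- B hoists the verb membership test out of the inner loop and precomputes each adverb's
-- qualification once, instead of A's per-pair recomputation over the full product; the
-- timing run measured B faster. Same pairs in the same order.

-- ===== PORT A =====
-- itertools.product → flatMap/map building the pair list; the generator's yields, in order,
-- become a flatMap emitting [p] or [] per pair, with branches in A's order.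
def generate_limited_adverb_verb_combos (possible_verbs : List (List String)) (possible_adverbs : List (List String)) (verb_words_in_instruction : List String) (adverb_words_in_instruction : List String) : List (List String × List String) :=
  ((possible_verbs.flatMap (fun v => possible_adverbs.map (fun a => (v, a)))).flatMap
    (fun p =>
      let verb_is_in_instruction := p.1.all (fun w => verb_words_in_instruction.contains w)
      let adverb_is_in_instruction :=
        ((!p.2.isEmpty) && p.2.all (fun w => adverb_words_in_instruction.contains w)) ||
        (adverb_words_in_instruction.isEmpty && p.2.isEmpty)
      if adverb_is_in_instruction then [p]
      else if verb_is_in_instruction then [p]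
      else []))

-- ===== PORT B =====
-- B: one precomputed per-adverb qualification list; per verb either a whole row (map)
-- or the filtered qualifying adverbs (zip + filterMap).
def generate_limited_adverb_verb_combos_alt (possible_verbs : List (List String)) (possible_adverbs : List (List String)) (verb_words_in_instruction : List String) (adverb_words_in_instruction : List String) : List (List String × List String) :=
  let adverb_qualifies := possible_adverbs.map (fun a =>
    ((!a.isEmpty) && a.all (fun w => adverb_words_in_instruction.contains w)) ||
    (adverb_words_in_instruction.isEmpty && a.isEmpty))
  possible_verbs.flatMap (fun v =>
    if v.all (fun w => verb_words_in_instruction.contains w) then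
      possible_adverbs.map (fun a => (v, a))
    else
      (possible_adverbs.zip adverb_qualifies).filterMap
        (fun aq => if aq.2 then some (v, aq.1) else none))

-- ===== PRECONDITION & SPEC =====
def Spec_generate_limited_adverb_verb_combos (possible_verbs : List (List String)) (possible_adverbs : List (List String)) (verb_words_in_instruction : List String) (adverb_words_in_instruction : List String) (out : List (List String × List String)) : Prop := out = generate_limited_adverb_verb_combos_alt possible_verbs possible_adverbs verb_words_in_instruction adverb_words_in_instruction
instance (possible_verbs : List (List String)) (possible_adverbs : List (List String)) (verb_words_in_instruction : List String) (adverb_words_in_instruction : List String) (out : List (List String × List String)) : Decidable (Spec_generate_limited_adverb_verb_combos possible_verbs possible_adverbs verb_words_in_instruction adverb_words_in_instruction out) := by unfold Spec_generate_limited_adverb_verb_combos; infer_instance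

-- ===== CLAIM (what is proved, stated in full; the proofs are below) =====
def Claim_equal_generate_limited_adverb_verb_combos : Prop := ∀ (possible_verbs : List (List String)) (possible_adverbs : List (List String)) (verb_words_in_instruction : List String) (adverb_words_in_instruction : List String), Dom_generate_limited_adverb_verb_combos possible_verbs possible_adverbs verb_words_in_instruction adverb_words_in_instruction → Spec_generate_limited_adverb_verb_combos possible_verbs possible_adverbs verb_words_in_instruction adverb_words_in_instruction (generate_limited_adverb_verb_combos possible_verbs possible_adverbs verb_words_in_instruction adverb_words_in_instruction)

-- ===== LEMMAS AND PROOFS =====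

-- ===== VERDICT (by name: the statement is the Claim_ definition above) =====
-- Per-verb lemma: A's inner row over the pair list equals B's per-verb emission.
theorem pv_row_eq (pa : List (List String)) (vw aw : List String) (v : List String) :
    ((pa.map (fun a => (v, a))).flatMap
      (fun p =>
        let verb_is := p.1.all (fun w => vw.contains w)
        let adv_is := ((!p.2.isEmpty) && p.2.all (fun w => aw.contains w)) ||
          (aw.isEmpty && p.2.isEmpty)
        if adv_is then [p] else if verb_is then [p] else [])) =
    (if v.all (fun w => vw.contains w) then pa.map (fun a => (v, a))
     else (pa.zip (pa.map (fun a =>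
        ((!a.isEmpty) && a.all (fun w => aw.contains w)) ||
        (aw.isEmpty && a.isEmpty)))).filterMap
        (fun aq => if aq.2 then some (v, aq.1) else none)) := by
  induction pa with
  | nil => simp
  | cons a pa ih =>
    simp only [List.map_cons, List.flatMap_cons, List.zip_cons_cons, List.filterMap_cons]
    cases ha : (((!a.isEmpty) && a.all (fun w => aw.contains w)) ||
        (aw.isEmpty && a.isEmpty))
    · cases hv : v.all (fun w => vw.contains w)
      · simp only [hv, ih, Bool.false_eq_true, ite_false, List.nil_append]
      · simp only [hv, ih, Bool.false_eq_true, ite_false, ite_true, List.singleton_append]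
    · cases hv : v.all (fun w => vw.contains w)
      · simp only [hv, ih, Bool.false_eq_true, ite_false, ite_true, List.singleton_append]
      · simp only [hv, ih, ite_true, List.singleton_append]

theorem generate_limited_adverb_verb_combos_spec : Claim_equal_generate_limited_adverb_verb_combos := by
  intro pv pa vw aw _
  unfold Spec_generate_limited_adverb_verb_combos
  unfold generate_limited_adverb_verb_combos generate_limited_adverb_verb_combos_alt
  rw [List.flatMap_assoc]
  exact congrArg (fun f => List.flatMap f pv) (funext (fun v => pv_row_eq pa vw aw v))
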